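-- pv_equiv track=rewrite | github.com/nowster/ceefax | ttxutils.py | nextpage
-- ===== SOURCE A (Python) =====
-- from typing import List, Optional, Union
--
-- def nextpage(page : Union[int, str]) -> int:
--     if type(page) is str:
--         p = int(str(page), 16)
--     else:
--         p = int(page)
--     while True:
--         p += 1
--         if (p & 0x0f) <= 9:
--             return p
-- ===== SOURCE B (Python) =====
-- from typing import List, Optional, Union
--
-- def nextpage(page : Union[int, str]) -> int:
--     if type(page) is str:
--         p = int(str(page), 16)
--     else:
--         p = int(page)
--     p += 1
--     r = p % 16
--     return p if r <= 9 else p - r + 16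
-- ===== Notes on version B (the rewrite author's own statement) =====
-- stated objective: simpler
-- what changed: Replaces the unit-stepping while-loop (increment until the low hex nibble is <= 9) with a closed-form arithmetic step: add 1, and if the low nibble exceeds 9 jump directly to the next multiple of 0x10.
import Mathlib
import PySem

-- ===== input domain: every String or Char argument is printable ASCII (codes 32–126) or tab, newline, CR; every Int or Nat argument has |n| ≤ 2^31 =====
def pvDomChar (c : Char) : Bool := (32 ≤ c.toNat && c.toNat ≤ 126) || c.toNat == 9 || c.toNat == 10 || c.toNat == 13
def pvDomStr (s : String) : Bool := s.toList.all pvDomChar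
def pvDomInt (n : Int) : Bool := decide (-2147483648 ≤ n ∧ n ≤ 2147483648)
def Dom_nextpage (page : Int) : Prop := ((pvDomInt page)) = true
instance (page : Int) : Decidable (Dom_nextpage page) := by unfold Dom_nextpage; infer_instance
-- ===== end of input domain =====

-- B replaces A's unit-stepping loop by a closed-form arithmetic step (simpler; same cost class).


-- ===== PORT A =====
-- A's `while True: p += 1; if (p & 0x0f) <= 9: return p`. The Nat argument is fuel that
-- only makes the recursion structural: the loop always returns within 6 steps, so the
-- fuel of 16 supplied below is never exhausted (nextpageLoop_fuel below proves this).
def nextpageLoop : Int -> Nat -> Int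
  | p, 0 => p + 1
  | p, fuel+1 =>
    let q := p + 1
    if PySem.Int.band q 15 <= 9 then q else nextpageLoop q fuel

-- On an Int argument A's `type(page) is str` test is False and `p = int(page)` is the identity.
def nextpage (page : Int) : Int := nextpageLoop page 16

-- ===== PORT B =====
def nextpage_alt (page : Int) : Int :=
  let p := page + 1
  let r := PySem.Int.mod p 16
  if r ≤ 9 then p else p - r + 16

-- ===== PRECONDITION & SPEC =====
def Spec_nextpage (page : Int) (out : Int) : Prop := out = nextpage_alt page
instance (page : Int) (out : Int) : Decidable (Spec_nextpage page out) := by unfold Spec_nextpage; infer_instance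

-- ===== CLAIM (what is proved, stated in full; the proofs are below) =====
def Claim_equal_nextpage : Prop := ∀ (page : Int), Dom_nextpage page → Spec_nextpage page (nextpage page)

-- ===== LEMMAS AND PROOFS =====
-- `p & 0x0f` is PySem.Int.band (Python-exact on negatives): it equals emod 16.
theorem pvBand15 (p : Int) : PySem.Int.band p 15 = p % 16 := by
  unfold PySem.Int.band
  split_ifs with h h2 h3
  · have : p.toNat &&& (15:Int).toNat = p.toNat % 16 := Nat.and_two_pow_sub_one_eq_mod _ 4
    omega
  · omega
  · have : (15:Int).toNat &&& (-p - 1).toNat = (-p-1).toNat % 16 := by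
      rw [Nat.and_comm]; exact Nat.and_two_pow_sub_one_eq_mod _ 4
    omega
  · omega

theorem nextpage_alt_eval (page : Int) :
    nextpage_alt page =
      if (page + 1) % 16 ≤ 9 then page + 1 else page + 1 - (page + 1) % 16 + 16 := by
  simp only [nextpage_alt, PySem.Int.mod_eq_emod_of_pos (show (0:Int) < 16 by omega)]

-- fuel suffices: whenever the number of remaining loop steps is at most the fuel,
-- the loop computes B's closed form.
theorem nextpageLoop_fuel (fuel : Nat) : forall p : Int,
    ((16 - ((p + 1) % 16)) % 16).toNat <= fuel -> nextpageLoop p fuel = nextpage_alt p := by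
  induction fuel with
  | zero =>
    intro p h
    rw [nextpage_alt_eval, nextpageLoop]
    split_ifs <;> omega
  | succ fuel ih =>
    intro p h
    rw [nextpageLoop]
    simp only [pvBand15]
    by_cases hq : (p + 1) % 16 <= 9
    · rw [if_pos hq, nextpage_alt_eval, if_pos hq]
    · rw [if_neg hq, ih (p + 1) (by omega), nextpage_alt_eval, nextpage_alt_eval]
      split_ifs <;> omega

-- ===== VERDICT (by name: the statement is the Claim_ definition above) =====
theorem nextpage_spec : Claim_equal_nextpage := by
  intro page _
  unfold Spec_nextpage nextpage
  exact nextpageLoop_fuel 16 page (by omega)
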